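-- pv_equiv track=rewrite | github.com/ChoBae/Algorithms | CodeUp/66.py | check
-- ===== SOURCE A (Python) =====
-- def check(towers, rule):
--     #인덱스를 비교할 변수 -> 0부터
--     sorting = rule.index(rule[0])
--     for towers_word in towers:
--         if towers_word in rule:
--             # A->B->D의 순으로 되야하기때문에 내장 변수의 인덱스가 더 크다면 역순이라는 뜻
--             if sorting > rule.index(towers_word):
--                 return '불가능'
--             sorting = rule.index(towers_word)
--     return '가능'
-- ===== SOURCE B (Python) =====
-- def check(towers, rule):
--     idx = [rule.index(w) for w in towers if w in rule]
--     return '가능' if idx == sorted(idx) else '불가능'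
-- ===== Notes on version B (the rewrite author's own statement) =====
-- stated objective: simpler
-- what changed: Replaces A's online scan that carries a running last-seen rule index with a two-phase check: materialize the list of rule indices of the matching words and compare it with its sorted copy.
import Mathlib
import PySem

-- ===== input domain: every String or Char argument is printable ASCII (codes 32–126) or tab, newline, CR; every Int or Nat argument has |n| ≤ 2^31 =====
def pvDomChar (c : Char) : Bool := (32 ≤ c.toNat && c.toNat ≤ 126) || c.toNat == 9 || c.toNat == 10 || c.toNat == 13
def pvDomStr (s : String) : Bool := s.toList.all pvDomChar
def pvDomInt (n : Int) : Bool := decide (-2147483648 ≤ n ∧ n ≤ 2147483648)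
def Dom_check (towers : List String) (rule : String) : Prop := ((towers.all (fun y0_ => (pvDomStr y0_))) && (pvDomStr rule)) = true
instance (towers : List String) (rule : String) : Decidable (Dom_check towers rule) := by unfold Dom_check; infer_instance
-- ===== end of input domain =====

-- B replaces A's online scan (carrying a running last rule-index) with a two-phase
-- materialize-then-compare: collect the rule indices of the matching words and compare
-- the list with its sorted copy ("simpler": a different decomposition, not faster).


-- ===== PORT A =====
-- the for-loop with its early return and the carried variable `sorting`
def checkLoop (rule : String) (towers : List String) (sorting : Int) : String :=
  match towers with
  | [] => "가능"
  | w :: rest =>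
    if PySem.Str.isIn w rule then
      if sorting > PySem.Str.find rule w then "불가능"
      else checkLoop rule rest (PySem.Str.find rule w)
    else checkLoop rule rest sorting

def check (towers : List String) (rule : String) : String :=
  match PySem.Str.pyGet? rule 0 with          -- rule[0]; none = IndexError, excluded by Pre_check
  | none => ""
  | some c => checkLoop rule towers (PySem.Str.find rule (String.ofList [c]))   -- rule.index(rule[0])

-- ===== PORT B =====
def check_alt (towers : List String) (rule : String) : String :=
  let idx := (towers.filter (fun w => PySem.Str.isIn w rule)).map (fun w => PySem.Str.find rule w)
  if idx = PySem.List.sorted idx (fun x => x) false then "가능" else "불가능"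

-- ===== PRECONDITION & SPEC =====
-- Pre_ excludes exactly rule = "", where A raises IndexError at rule[0]
def Pre_check (towers : List String) (rule : String) : Prop := rule ≠ ""
instance (towers : List String) (rule : String) : Decidable (Pre_check towers rule) := by unfold Pre_check; infer_instance
def pvWitness_check : List String × String := (["A", "B"], "AB")

def Spec_check (towers : List String) (rule : String) (out : String) : Prop := out = check_alt towers rule
instance (towers : List String) (rule : String) (out : String) : Decidable (Spec_check towers rule out) := by unfold Spec_check; infer_instance

-- ===== CLAIM (what is proved, stated in full; the proofs are below) =====
def Claim_equal_check : Prop := ∀ (towers : List String) (rule : String), Dom_check towers rule → Pre_check towers rule → Spec_check towers rule (check towers rule)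

-- ===== LEMMAS AND PROOFS =====

-- the index list B materializes
def idxList (rule : String) (towers : List String) : List Int :=
  (towers.filter (fun w => PySem.Str.isIn w rule)).map (fun w => PySem.Str.find rule w)

lemma idxList_nonneg (rule : String) (towers : List String) :
    ∀ x ∈ idxList rule towers, 0 ≤ x := by
  intro x hx
  simp only [idxList, List.mem_map, List.mem_filter] at hx
  obtain ⟨w, ⟨_, hw⟩, rfl⟩ := hx
  exact (PySem.Str.find_nonneg_iff rule w).mpr ((PySem.Str.isIn_iff_infix w rule).mp hw)

-- A's loop returns "가능" exactly when sorting :: idxList is nondecreasing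
lemma checkLoop_eq (rule : String) (towers : List String) (s : Int) :
    checkLoop rule towers s =
      if List.IsChain (· ≤ ·) (s :: idxList rule towers) then "가능" else "불가능" := by
  induction towers generalizing s with
  | nil => simp [checkLoop, idxList]
  | cons w rest ih =>
    by_cases hw : PySem.Str.isIn w rule = true
    · have hidx : idxList rule (w :: rest) = PySem.Str.find rule w :: idxList rule rest := by
        simp only [idxList, List.filter_cons, hw, if_true, List.map_cons]
      rw [hidx]
      simp only [checkLoop, hw, if_true]
      simp only [List.isChain_cons]
      by_cases hs : s > PySem.Str.find rule w
      · have hf : PySem.Chars.find rule.toList w.toList < s := by simpa using hs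
        simp [hf, show ¬ s ≤ PySem.Chars.find rule.toList w.toList by omega]
      · have hf : ¬ PySem.Chars.find rule.toList w.toList < s := by simpa using hs
        rw [ih]
        simp [hf, show s ≤ PySem.Chars.find rule.toList w.toList by omega, List.isChain_cons]
    · have hidx : idxList rule (w :: rest) = idxList rule rest := by
        simp only [idxList, List.filter_cons, Bool.eq_false_iff.mpr hw]
        rfl
      simp only [checkLoop, hw, Bool.false_eq_true, if_false]
      rw [ih, hidx]

-- rule.index(rule[0]) = 0 for nonempty rule
lemma find_head_eq_zero (c : Char) (cs : List Char) :
    PySem.Chars.find (c :: cs) [c] = 0 := by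
  have hinf : [c] <:+: (c :: cs) := ⟨[], cs, by simp⟩
  have hne : PySem.Chars.find (c :: cs) [c] ≠ -1 :=
    (PySem.Chars.find_ne_neg_one_iff _ _).mpr hinf
  have hge : 0 ≤ PySem.Chars.find (c :: cs) [c] := by
    have := PySem.Chars.neg_one_le_find (c :: cs) [c]
    omega
  obtain ⟨hpre, hfirst⟩ := PySem.Chars.find_spec (s := c :: cs) (sub := [c]) hge
  by_contra hne0
  have hpos : 0 < (PySem.Chars.find (c :: cs) [c]).toNat := by omega
  exact hfirst 0 hpos ⟨cs, by simp⟩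

-- B's comparison with the sorted copy tests exactly Pairwise (· ≤ ·)
lemma sorted_self_iff (idx : List Int) :
    (idx = PySem.List.sorted idx (fun x => x) false) ↔ idx.Pairwise (· ≤ ·) := by
  constructor
  · intro h
    have := PySem.List.sorted_pairwise (xs := idx) (key := fun x => x)
    rw [← h] at this
    exact this
  · intro h
    exact (PySem.List.sorted_eq_self_of_pairwise (xs := idx) (key := fun x => x) h).symm

-- ===== VERDICT (by name: the statement is the Claim_ definition above) =====
theorem check_spec : Claim_equal_check := by
  intro towers rule _ hpre
  unfold Spec_check check check_alt
  obtain ⟨c, cs, hrl⟩ : ∃ c cs, rule.toList = c :: cs := by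
    cases h : rule.toList with
    | nil =>
      exfalso
      apply hpre
      have := congrArg String.ofList h
      simpa using this
    | cons c cs => exact ⟨c, cs, rfl⟩
  have hget : PySem.Str.pyGet? rule 0 = some c := by
    rw [show (0 : Int) = ((0 : Nat) : Int) by rfl, PySem.Str.pyGet?_natCast, hrl]; rfl
  rw [hget]
  have hfind0 : PySem.Str.find rule (String.ofList [c]) = 0 := by
    rw [PySem.Str.find_eq, String.toList_ofList, hrl]
    exact find_head_eq_zero c cs
  dsimp only
  rw [hfind0, checkLoop_eq]
  show _ = (if idxList rule towers = PySem.List.sorted (idxList rule towers) (fun x => x) false then "가능" else "불가능")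
  have hhead : (∀ y ∈ (idxList rule towers).head?, (0:Int) ≤ y) := by
    intro y hy
    exact idxList_nonneg rule towers y (List.mem_of_mem_head? hy)
  simp only [List.isChain_cons, sorted_self_iff, ← List.isChain_iff_pairwise]
  rw [if_congr (and_iff_right hhead) rfl rfl]
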